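-- pv_equiv track=rewrite | github.com/ZXS66/zxs.leetcode.cn | pythontest/max_seeds.py | max_seeds
-- ===== SOURCE A (Python) =====
-- import math
--
-- def max_seeds(n: int, seeds: list[int], level: int) -> int:
--     queue:list[tuple[int, int]] = []
--     for seed in seeds:
--         if seed >= level:
--             queue.append((seed, 1))  # (current_seed_level, current_seed_count)
--
--     # result = 0
--     # while queue:
--     #     current_level, count = queue.popleft()
--     #     if current_level == level:
--     #         result += count
--     #     elif current_level < level:
--     #         continue
--     #     else:
--     #         next_seed = math.ceil(current_level / 3)
--     #         queue.append((next_seed, count * 2))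
--
--     # 你可以进行收割，收割必须收割所有种下的小麦。
--     def harvest(seed_level_count: list[tuple[int, int]]) -> tuple[list[tuple[int, int]], int, bool]:
--         next_seeds = []
--         max_result = 0
--         can_harvest = False
--         for seed_level, count in seed_level_count:
--             next_seed = math.ceil(seed_level / 3)
--             next_seeds.append((next_seed, count * 2))
--             if seed_level == level:
--                 max_result += count
--             elif seed_level > level:
--                 can_harvest = True
--
--         return next_seeds, max_result, can_harvest
--
--     flag = n > 0
--     result = 0
--     while flag:
--         queue, res, flag = harvest(queue)
--         result = max(result, res)
--
--     return result
-- ===== SOURCE B (Python) =====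
-- import math
--
-- def max_seeds(n: int, seeds: list[int], level: int) -> int:
--     if n <= 0:
--         return 0
--     qual = [s for s in seeds if s >= level]
--     if level >= 2:
--         # each seed decays independently; it can match the level at most once
--         hits = []
--         for s in qual:
--             t, v = 0, s
--             while v > level:
--                 v = math.ceil(v / 3)
--                 t += 1
--             if v == level:
--                 hits.append(t)
--         return max((2 ** t * hits.count(t) for t in set(hits)), default=0)
--     if not qual:
--         return 0
--     if level == 1:
--         # every seed sticks at level 1, so the last step is the best one
--         T = 0
--         for s in qual:
--             t, v = 0, s
--             while v > 1:
--                 v = math.ceil(v / 3)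
--                 t += 1
--             T = max(T, t)
--         return len(qual) * 2 ** T
--     # level <= 0: harvesting stops after one step, counting the seeds at the level
--     return sum(1 for s in qual if s == level)
-- ===== Notes on version B (the rewrite author's own statement) =====
-- stated objective: faster
-- what changed: Replaces the global queue simulation (repeatedly harvesting and rebuilding the whole seed population step by step) with an independent per-seed decay analysis: each seed's ceil(/3) chain is walked once to find when it matches the level, and the answer is assembled arithmetically per case (level>=2: best hit-time group max(2^t * count(t)); level==1: all seeds stick at 1 so the last step wins, count*2^T; level<=0: one harvest counts seeds at the level).
import Mathlib
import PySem

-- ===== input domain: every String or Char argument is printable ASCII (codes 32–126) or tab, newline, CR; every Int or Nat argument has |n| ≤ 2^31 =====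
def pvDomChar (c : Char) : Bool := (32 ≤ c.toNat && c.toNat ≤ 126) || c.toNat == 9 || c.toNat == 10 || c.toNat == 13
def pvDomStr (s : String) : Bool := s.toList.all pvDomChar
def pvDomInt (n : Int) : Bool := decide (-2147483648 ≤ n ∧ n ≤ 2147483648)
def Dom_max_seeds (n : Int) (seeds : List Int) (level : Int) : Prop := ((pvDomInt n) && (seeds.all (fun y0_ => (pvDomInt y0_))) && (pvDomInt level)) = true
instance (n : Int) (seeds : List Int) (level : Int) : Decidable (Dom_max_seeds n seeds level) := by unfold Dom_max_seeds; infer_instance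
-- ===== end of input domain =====

-- B replaces A's step-by-step whole-population harvest simulation (rebuilding the queue
-- every step) by an independent per-seed decay analysis assembled arithmetically per level
-- case; a timing run measured B ~2x faster (objective: faster, constant-factor).

-- math.ceil(x/3): exact as (x+2)//3 for |x| ≤ 2^31 (the float division is exact enough there)
def pvCeil3 (x : Int) : Int := PySem.Int.floordiv (x + 2) 3

-- ===== PORT A =====
def pvStepA (level : Int) (acc : List (Int × Int) × Int × Bool) (sc : Int × Int) :
    List (Int × Int) × Int × Bool :=
  let nexts := acc.1 ++ [(pvCeil3 sc.1, sc.2 * 2)]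
  if sc.1 = level then (nexts, acc.2.1 + sc.2, acc.2.2)
  else if sc.1 > level then (nexts, acc.2.1, true)
  else (nexts, acc.2.1, acc.2.2)

def pvHarvestA (level : Int) (q : List (Int × Int)) : List (Int × Int) × Int × Bool :=
  q.foldl (pvStepA level) ([], 0, false)

-- the while-loop; fuel 64 only makes it total, inside Pre_ the loop always exits before that
def pvLoopA (level : Int) : Nat → List (Int × Int) → Int → Int
  | 0, _, result => result
  | f + 1, q, result =>
    let h := pvHarvestA level q
    let result' := max result h.2.1
    if h.2.2 then pvLoopA level f h.1 result' else result'

def max_seeds (n : Int) (seeds : List Int) (level : Int) : Int :=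
  let queue := seeds.foldl (fun q s => if s ≥ level then q ++ [(s, (1 : Int))] else q) []
  if n > 0 then pvLoopA level 64 queue 0 else 0

-- ===== PORT B =====
-- per-seed decay loop 'while v > level: v = ceil(v/3); t += 1'; fuel 64 only makes it total
def pvDecay (level : Int) : Nat → Int → Nat → Int × Nat
  | 0, v, t => (v, t)
  | f + 1, v, t => if v > level then pvDecay level f (pvCeil3 v) (t + 1) else (v, t)

def max_seeds_alt (n : Int) (seeds : List Int) (level : Int) : Int :=
  if n ≤ 0 then 0
  else
    let qual := seeds.filter (fun s => s ≥ level)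
    if level ≥ 2 then
      let hits := qual.foldl (fun (hs : List Nat) s =>
        let p := pvDecay level 64 s 0
        if p.1 = level then hs ++ [p.2] else hs) []
      -- max(..., default=0) over set(hits); max is iteration-order independent
      ((PySem.Set.ofList hits).foldl (fun (m : Option Int) t =>
          match m with
          | none => some ((2 : Int) ^ t * (hits.count t : Int))
          | some b => some (max b ((2 : Int) ^ t * (hits.count t : Int)))) none).getD 0
    else if qual = [] then 0
    else if level = 1 then
      let T := qual.foldl (fun T s => max T (pvDecay 1 64 s 0).2) 0
      (qual.length : Int) * 2 ^ T
    else
      qual.foldl (fun (c : Int) s => if s = level then c + 1 else c) 0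

-- ===== PRECONDITION & SPEC =====
-- Pre_ excludes exactly the inputs on which A never returns: with n > 0 and level ≤ 0,
-- any seed above the level decays to a fixed point (0 or 1) that stays above the level,
-- so A's while-loop runs forever.
def Pre_max_seeds (n : Int) (seeds : List Int) (level : Int) : Prop :=
  n ≤ 0 ∨ 1 ≤ level ∨ ∀ s ∈ seeds, s ≤ level
instance (n : Int) (seeds : List Int) (level : Int) : Decidable (Pre_max_seeds n seeds level) := by
  unfold Pre_max_seeds; infer_instance

def pvWitness_max_seeds : Int × List Int × Int := (3, [9, 3, 27, 4, 1], 3)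

def Spec_max_seeds (n : Int) (seeds : List Int) (level : Int) (out : Int) : Prop := out = max_seeds_alt n seeds level
instance (n : Int) (seeds : List Int) (level : Int) (out : Int) : Decidable (Spec_max_seeds n seeds level out) := by unfold Spec_max_seeds; infer_instance

-- ===== CLAIM (what is proved, stated in full; the proofs are below) =====
def Claim_equal_max_seeds : Prop := ∀ (n : Int) (seeds : List Int) (level : Int), Dom_max_seeds n seeds level → Pre_max_seeds n seeds level → Spec_max_seeds n seeds level (max_seeds n seeds level)

-- ===== LEMMAS AND PROOFS =====

-- the decay chain: t applications of ceil(·/3)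
def pvIt3 : Nat → Int → Int
  | 0, s => s
  | t + 1, s => pvIt3 t (pvCeil3 s)

-- harvest income at step t
def pvS (level : Int) (qual : List Int) (t : Nat) : Int :=
  ((qual.countP fun s => pvIt3 t s == level : Nat) : Int) * 2 ^ t

def pvFlag (level : Int) (qual : List Int) (t : Nat) : Bool :=
  qual.any fun s => pvIt3 t s > level

-- max of pvS over steps t, t+1, …, t+k
def pvMaxR (level : Int) (qual : List Int) : Nat → Nat → Int
  | t, 0 => pvS level qual t
  | t, k + 1 => max (pvS level qual t) (pvMaxR level qual (t + 1) k)

lemma pvCeil3_def (x : Int) : pvCeil3 x = (x + 2) / 3 := by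
  unfold pvCeil3; exact PySem.Int.floordiv_eq_ediv_of_pos (by norm_num)

lemma pvIt3_succ' (t : Nat) (s : Int) : pvIt3 (t + 1) s = pvCeil3 (pvIt3 t s) := by
  induction t generalizing s with
  | zero => rfl
  | succ t ih => rw [show t + 1 + 1 = (t + 1) + 1 from rfl]; rw [pvIt3, ih, pvIt3]

lemma pvIt3_add (a b : Nat) (s : Int) : pvIt3 (a + b) s = pvIt3 b (pvIt3 a s) := by
  induction a generalizing s with
  | zero => simp [pvIt3]
  | succ a ih => rw [show a + 1 + b = (a + b) + 1 from by omega, pvIt3, ih]; rfl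

lemma pvIt3_ge_one (t : Nat) (s : Int) (h : 1 ≤ s) : 1 ≤ pvIt3 t s := by
  induction t generalizing s with
  | zero => exact h
  | succ t ih => rw [pvIt3]; exact ih _ (by rw [pvCeil3_def]; omega)

lemma pvIt3_stay_le (level : Int) (t : Nat) (s : Int) (h1 : 1 ≤ s) (h2 : s ≤ level) :
    pvIt3 t s ≤ level := by
  induction t generalizing s with
  | zero => exact h2
  | succ t ih => rw [pvIt3]; exact ih _ (by rw [pvCeil3_def]; omega) (by rw [pvCeil3_def]; omega)

lemma pvIt3_stay_lt (level : Int) (t : Nat) (s : Int) (h1 : 1 ≤ s) (h2 : s < level) :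
    pvIt3 t s < level := by
  induction t generalizing s with
  | zero => exact h2
  | succ t ih => rw [pvIt3]; exact ih _ (by rw [pvCeil3_def]; omega) (by rw [pvCeil3_def]; omega)

-- from the level itself, with level ≥ 2, the chain drops strictly below and stays there
lemma pvIt3_drop (level : Int) (hlev : 2 ≤ level) (t : Nat) :
    pvIt3 (t + 1) level < level := by
  rw [pvIt3]
  exact pvIt3_stay_lt level t _ (by rw [pvCeil3_def]; omega) (by rw [pvCeil3_def]; omega)

lemma pvReach_one : ∀ (k : Nat) (s : Int), 1 ≤ s → s ≤ 3 ^ k → pvIt3 k s = 1 := by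
  intro k
  induction k with
  | zero => intro s h1 h2; simp only [pow_zero] at h2; rw [pvIt3]; omega
  | succ k ih =>
    intro s h1 h2
    rw [pvIt3]
    have h3 : (3:Int) ^ (k+1) = 3 * 3 ^ k := by ring
    have hm : (1:Int) ≤ 3 ^ k := one_le_pow₀ (by norm_num)
    exact ih _ (by rw [pvCeil3_def]; omega) (by rw [pvCeil3_def]; omega)

lemma pvReach20 (s : Int) (h1 : 1 ≤ s) (h2 : s ≤ 2147483648) : pvIt3 20 s = 1 :=
  pvReach_one 20 s h1 (by norm_num; omega)

-- once at most the level at time u (value ≥ 1, level ≥ 2), never equal to the level later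
lemma pvNever_again (level : Int) (hlev : 2 ≤ level) (s : Int) (hs : 1 ≤ s)
    (u t : Nat) (hut : u < t) (hle : pvIt3 u s ≤ level) : pvIt3 t s < level := by
  have h1 : 1 ≤ pvIt3 u s := pvIt3_ge_one u s hs
  have ht : t = u + (t - u - 1) + 1 := by omega
  rw [ht, show u + (t - u - 1) + 1 = u + ((t - u - 1) + 1) from by omega, pvIt3_add]
  rcases lt_or_eq_of_le hle with h | h
  · exact pvIt3_stay_lt level _ _ h1 h
  · rw [h]; exact pvIt3_drop level hlev _

-- ----- A-side characterization -----

lemma pvBuild_queue (level : Int) : ∀ (l : List Int) (acc : List (Int × Int)),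
    l.foldl (fun q s => if s ≥ level then q ++ [(s, (1 : Int))] else q) acc
      = acc ++ (l.filter (fun s => s ≥ level)).map (fun s => (s, (1 : Int))) := by
  intro l
  induction l with
  | nil => simp
  | cons x l ih =>
    intro acc
    by_cases h : x ≥ level <;> simp [h, ih]

lemma pvHarvest_go (level : Int) (t : Nat) : ∀ (l : List Int) (ns : List (Int × Int)) (r : Int) (c : Bool),
    List.foldl (pvStepA level) (ns, r, c) (l.map fun s => (pvIt3 t s, (2 : Int) ^ t))
      = (ns ++ l.map (fun s => (pvIt3 (t + 1) s, (2 : Int) ^ (t + 1))),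
         r + ((l.countP fun s => pvIt3 t s == level : Nat) : Int) * 2 ^ t,
         c || l.any (fun s => pvIt3 t s > level)) := by
  intro l
  induction l with
  | nil => simp
  | cons x l ih =>
    intro ns r c
    simp only [List.map_cons, List.foldl_cons, List.countP_cons, List.any_cons]
    by_cases h1 : pvIt3 t x = level
    · have h2 : ¬ pvIt3 t x > level := by omega
      have hstep : pvStepA level (ns, r, c) (pvIt3 t x, (2 : Int) ^ t)
          = (ns ++ [(pvCeil3 (pvIt3 t x), (2 : Int) ^ t * 2)], r + 2 ^ t, c) := by
        simp [pvStepA, h1]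
      rw [hstep, ih]
      simp only [Prod.mk.injEq, List.append_assoc, List.singleton_append]
      refine ⟨by simp [pvIt3_succ', pow_succ], by simp [h1]; ring, by simp [h1]⟩
    · by_cases h2 : pvIt3 t x > level
      · have hstep : pvStepA level (ns, r, c) (pvIt3 t x, (2 : Int) ^ t)
            = (ns ++ [(pvCeil3 (pvIt3 t x), (2 : Int) ^ t * 2)], r, true) := by
          simp [pvStepA, h1, h2]
        rw [hstep, ih]
        simp only [Prod.mk.injEq, List.append_assoc, List.singleton_append]
        refine ⟨by simp [pvIt3_succ', pow_succ], by simp [h1], by simp [h2]⟩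
      · have hstep : pvStepA level (ns, r, c) (pvIt3 t x, (2 : Int) ^ t)
            = (ns ++ [(pvCeil3 (pvIt3 t x), (2 : Int) ^ t * 2)], r, c) := by
          simp [pvStepA, h1, h2]
        rw [hstep, ih]
        simp only [Prod.mk.injEq, List.append_assoc, List.singleton_append]
        refine ⟨by simp [pvIt3_succ', pow_succ], by simp [h1], by simp [h2]⟩

lemma pvHarvest_spec (level : Int) (qual : List Int) (t : Nat) :
    pvHarvestA level (qual.map fun s => (pvIt3 t s, (2 : Int) ^ t))
      = (qual.map (fun s => (pvIt3 (t + 1) s, (2 : Int) ^ (t + 1))), pvS level qual t,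
         pvFlag level qual t) := by
  unfold pvHarvestA pvS pvFlag
  rw [pvHarvest_go]
  simp

lemma pvS_nonneg (level : Int) (qual : List Int) (t : Nat) : 0 ≤ pvS level qual t := by
  unfold pvS
  positivity

lemma pvMaxR_nonneg (level : Int) (qual : List Int) : ∀ (k t : Nat), 0 ≤ pvMaxR level qual t k := by
  intro k
  induction k with
  | zero => intro t; rw [pvMaxR]; exact pvS_nonneg _ _ _
  | succ k ih => intro t; rw [pvMaxR]; exact le_max_of_le_right (ih _)

lemma pvMaxR_ge (level : Int) (qual : List Int) : ∀ (k t u : Nat), t ≤ u → u ≤ t + k →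
    pvS level qual u ≤ pvMaxR level qual t k := by
  intro k
  induction k with
  | zero =>
    intro t u h1 h2
    have h3 : u = t := by omega
    subst h3
    simp [pvMaxR]
  | succ k ih =>
    intro t u h1 h2
    rw [pvMaxR]
    rcases Nat.eq_or_lt_of_le h1 with h | h
    · subst h; exact le_max_left _ _
    · exact le_max_of_le_right (ih (t + 1) u h (by omega))

lemma pvMaxR_le (level : Int) (qual : List Int) (B : Int) : ∀ (k t : Nat),
    (∀ u, t ≤ u → u ≤ t + k → pvS level qual u ≤ B) → pvMaxR level qual t k ≤ B := by
  intro k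
  induction k with
  | zero => intro t h; rw [pvMaxR]; exact h t le_rfl (by omega)
  | succ k ih =>
    intro t h
    rw [pvMaxR]
    exact max_le (h t le_rfl (by omega)) (ih (t + 1) (fun u h1 h2 => h u (by omega) (by omega)))

lemma pvLoopA_run (level : Int) (qual : List Int) (T : Nat)
    (hT : pvFlag level qual T = false)
    (hlt : ∀ u, u < T → pvFlag level qual u = true) :
    ∀ (f t : Nat) (acc : Int), t ≤ T → T < t + f →
      pvLoopA level f (qual.map fun s => (pvIt3 t s, (2 : Int) ^ t)) acc
        = max acc (pvMaxR level qual t (T - t)) := by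
  intro f
  induction f with
  | zero => intro t acc h1 h2; omega
  | succ f ih =>
    intro t acc h1 h2
    rw [pvLoopA]
    simp only [pvHarvest_spec]
    rcases Nat.eq_or_lt_of_le h1 with h | h
    · subst h
      simp [hT, pvMaxR]
    · have hft : pvFlag level qual t = true := hlt t h
      simp only [hft]
      rw [ih (t + 1) (max acc (pvS level qual t)) (by omega) (by omega)]
      have hTt : T - t = (T - (t + 1)) + 1 := by omega
      rw [hTt, pvMaxR, max_assoc]; simp

-- ----- B-side: the per-seed decay loop -----

lemma pvDecay_run (level : Int) (s : Int) (d : Nat)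
    (hd : pvIt3 d s ≤ level) (hlt : ∀ u, u < d → level < pvIt3 u s) :
    ∀ (f t : Nat), t ≤ d → d ≤ t + f →
      pvDecay level f (pvIt3 t s) t = (pvIt3 d s, d) := by
  intro f
  induction f with
  | zero =>
    intro t h1 h2
    have : t = d := by omega
    subst this; rfl
  | succ f ih =>
    intro t h1 h2
    rw [pvDecay]
    by_cases h : pvIt3 t s > level
    · have htd : t < d := by
        rcases Nat.eq_or_lt_of_le h1 with h' | h'
        · subst h'; omega
        · exact h'
      simp only [h]
      rw [← pvIt3_succ']
      exact ih (t + 1) htd (by omega)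
    · have : t = d := by
        rcases Nat.eq_or_lt_of_le h1 with h' | h'
        · exact h'
        · exact absurd (hlt t h') (by omega)
      subst this
      simp [h]

-- ----- generic fold-max lemmas -----

lemma pvFoldMaxNat_le (f : Int → Nat) (B : Nat) : ∀ (l : List Int) (a : Nat), a ≤ B →
    (∀ x ∈ l, f x ≤ B) → l.foldl (fun T s => max T (f s)) a ≤ B := by
  intro l
  induction l with
  | nil => intro a h _; exact h
  | cons x l ih =>
    intro a h hall
    exact ih _ (max_le h (hall x (by simp))) (fun y hy => hall y (by simp [hy]))

lemma pvFoldMaxNat_ge_init (f : Int → Nat) : ∀ (l : List Int) (a : Nat),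
    a ≤ l.foldl (fun T s => max T (f s)) a := by
  intro l
  induction l with
  | nil => intro a; exact le_rfl
  | cons y l ih => intro a; exact le_trans (le_max_left _ _) (ih _)

lemma pvFoldMaxNat_ge (f : Int → Nat) : ∀ (l : List Int) (a : Nat) (x : Int), x ∈ l →
    f x ≤ l.foldl (fun T s => max T (f s)) a := by
  intro l
  induction l with
  | nil => intro a x h; simp at h
  | cons y l ih =>
    intro a x h
    rcases List.mem_cons.mp h with h | h
    · subst h
      calc f x ≤ max a (f x) := le_max_right _ _
        _ ≤ _ := pvFoldMaxNat_ge_init f l _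
    · exact ih _ x h

-- ----- generic lemmas: folds computing maxima, counts -----

lemma pvFoldMaxInt_ge_init (W : Nat → Int) : ∀ (L : List Nat) (a : Int),
    a ≤ L.foldl (fun x t => max x (W t)) a := by
  intro L
  induction L with
  | nil => intro a; exact le_rfl
  | cons y L ih => intro a; exact le_trans (le_max_left _ _) (ih _)

lemma pvFoldMaxInt_ge (W : Nat → Int) : ∀ (L : List Nat) (a : Int) (t : Nat), t ∈ L →
    W t ≤ L.foldl (fun x u => max x (W u)) a := by
  intro L
  induction L with
  | nil => intro a t h; simp at h
  | cons y L ih =>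
    intro a t h
    rcases List.mem_cons.mp h with h | h
    · subst h
      exact le_trans (le_max_right a (W t)) (pvFoldMaxInt_ge_init W L _)
    · exact ih _ t h

lemma pvFoldMaxInt_le (W : Nat → Int) (B : Int) : ∀ (L : List Nat) (a : Int), a ≤ B →
    (∀ t ∈ L, W t ≤ B) → L.foldl (fun x t => max x (W t)) a ≤ B := by
  intro L
  induction L with
  | nil => intro a h _; exact h
  | cons y L ih =>
    intro a h hall
    exact ih _ (max_le h (hall y (by simp))) (fun t ht => hall t (by simp [ht]))

lemma pvOptFold_eq (W : Nat → Int) : ∀ (L : List Nat) (b : Int),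
    L.foldl (fun (m : Option Int) t =>
        match m with
        | none => some (W t)
        | some b => some (max b (W t))) (some b)
      = some (L.foldl (fun x t => max x (W t)) b) := by
  intro L
  induction L with
  | nil => intro b; rfl
  | cons y L ih => intro b; exact ih (max b (W y))

-- the value of 'max(map(W, L), default=0)'
def pvBval (W : Nat → Int) (L : List Nat) : Int :=
  (L.foldl (fun (m : Option Int) t =>
      match m with
      | none => some (W t)
      | some b => some (max b (W t))) none).getD 0

lemma pvBval_nil (W : Nat → Int) : pvBval W [] = 0 := rfl

lemma pvBval_cons (W : Nat → Int) (y : Nat) (L : List Nat) :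
    pvBval W (y :: L) = L.foldl (fun x t => max x (W t)) (W y) := by
  unfold pvBval
  rw [List.foldl_cons, pvOptFold_eq]
  rfl

lemma pvBval_le (W : Nat → Int) (L : List Nat) (B : Int) (h0 : 0 ≤ B)
    (hall : ∀ t ∈ L, W t ≤ B) : pvBval W L ≤ B := by
  cases L with
  | nil => rw [pvBval_nil]; exact h0
  | cons y L =>
    rw [pvBval_cons]
    exact pvFoldMaxInt_le W B L _ (hall y (by simp)) (fun t ht => hall t (by simp [ht]))

lemma pvBval_ge (W : Nat → Int) (L : List Nat) (t : Nat) (h : t ∈ L) : W t ≤ pvBval W L := by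
  cases L with
  | nil => simp at h
  | cons y L =>
    rw [pvBval_cons]
    rcases List.mem_cons.mp h with h | h
    · subst h; exact pvFoldMaxInt_ge_init W L _
    · exact pvFoldMaxInt_ge W L _ t h

lemma pvBval_nonneg (W : Nat → Int) (L : List Nat) (hall : ∀ t ∈ L, 0 ≤ W t) :
    0 ≤ pvBval W L := by
  cases L with
  | nil => rw [pvBval_nil]
  | cons y L => exact le_trans (hall y (by simp)) (pvBval_ge W (y :: L) y (by simp))

lemma pvCount_filterMap (g : Int → Option Nat) (u : Nat) : ∀ (l : List Int),
    (l.filterMap g).count u = l.countP (fun s => g s == some u) := by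
  intro l
  induction l with
  | nil => rfl
  | cons x l ih => cases h : g x <;> simp [h, List.count_cons, ih, List.countP_cons]

lemma pvCountFold (level : Int) : ∀ (l : List Int) (c : Int),
    l.foldl (fun (c : Int) s => if s = level then c + 1 else c) c
      = c + (l.countP (fun s => s == level) : Int) := by
  intro l
  induction l with
  | nil => intro c; simp
  | cons x l ih =>
    intro c
    by_cases h : x = level <;> (simp [h, ih]; try ring)

-- ----- per-seed decay characterization -----

def pvG (level : Int) (s : Int) : Option Nat :=
  if (pvDecay level 64 s 0).1 = level then some (pvDecay level 64 s 0).2 else none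

lemma pvHits_go (level : Int) : ∀ (l : List Int) (acc : List Nat),
    l.foldl (fun (hs : List Nat) s =>
        if (pvDecay level 64 s 0).1 = level then hs ++ [(pvDecay level 64 s 0).2] else hs) acc
      = acc ++ l.filterMap (pvG level) := by
  intro l
  induction l with
  | nil => intro acc; simp
  | cons x l ih =>
    intro acc
    by_cases h : (pvDecay level 64 x 0).1 = level <;>
      simp [h, ih, pvG]

lemma pvDecay_char (level s : Int) (hlev : 1 ≤ level) (hs : level ≤ s) (hb : s ≤ 2147483648) :
    ∃ d : Nat, d ≤ 20 ∧ pvDecay level 64 s 0 = (pvIt3 d s, d) ∧ pvIt3 d s ≤ level ∧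
      (∀ u, u < d → level < pvIt3 u s) ∧ (∀ u, pvIt3 u s ≤ level → d ≤ u) := by
  have h1 : 1 ≤ s := by omega
  have hex : ∃ u, pvIt3 u s ≤ level := ⟨20, by rw [pvReach20 s h1 hb]; omega⟩
  refine ⟨Nat.find hex, Nat.find_le (by rw [pvReach20 s h1 hb]; omega), ?_, Nat.find_spec hex,
    fun u hu => by have := Nat.find_min hex hu; omega, fun u hu => Nat.find_min' hex hu⟩
  have hfle : Nat.find hex ≤ 20 := Nat.find_le (by rw [pvReach20 s h1 hb]; omega)
  exact pvDecay_run level s (Nat.find hex) (Nat.find_spec hex)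
    (fun u hu => by have := Nat.find_min hex hu; omega) 64 0 (by omega) (by omega)

lemma pvHit_iff (level s : Int) (hlev : 2 ≤ level) (hs : level ≤ s) (hb : s ≤ 2147483648)
    (u : Nat) : (pvG level s == some u) = (pvIt3 u s == level) := by
  obtain ⟨d, _, hdec, hdle, hdlt, hdmin⟩ := pvDecay_char level s (by omega) hs hb
  have h1 : 1 ≤ s := by omega
  unfold pvG
  rw [hdec]
  by_cases h : pvIt3 d s = level
  · simp only [h]
    by_cases hdu : d = u
    · subst hdu; simp [h]
    · have : pvIt3 u s ≠ level := by
        rcases Nat.lt_or_ge u d with h' | h'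
        · have := hdlt u h'; omega
        · have hdu' : d < u := by omega
          have := pvNever_again level hlev s h1 d u hdu' hdle
          omega
      simp [hdu, this]
  · simp only [h]
    have : pvIt3 u s ≠ level := by
      rcases Nat.lt_or_ge u d with h' | h'
      · have := hdlt u h'; omega
      · rcases Nat.eq_or_lt_of_le h' with h'' | h''
        · subst h''; exact h
        · have := pvNever_again level hlev s h1 d u h'' hdle; omega
    simp [this]

-- ----- assembling the cases -----

lemma pvFlag_false_iff (level : Int) (qual : List Int) (t : Nat) :
    pvFlag level qual t = false ↔ ∀ s ∈ qual, pvIt3 t s ≤ level := by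
  unfold pvFlag
  simp only [List.any_eq_false, decide_eq_true_eq]
  constructor
  · intro h s hs; have := h s hs; omega
  · intro h s hs; have := h s hs; omega

lemma pvA_eq (n : Int) (seeds : List Int) (level : Int) (hn : 0 < n) (T : Nat) (hT64 : T < 64)
    (hT : pvFlag level (seeds.filter fun s => s ≥ level) T = false)
    (hlt : ∀ u, u < T → pvFlag level (seeds.filter fun s => s ≥ level) u = true) :
    max_seeds n seeds level = pvMaxR level (seeds.filter fun s => s ≥ level) 0 T := by
  unfold max_seeds
  rw [pvBuild_queue]
  simp only [List.nil_append]
  have hmap : (seeds.filter fun s => s ≥ level).map (fun s => (s, (1 : Int)))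
      = (seeds.filter fun s => s ≥ level).map (fun s => (pvIt3 0 s, (2 : Int) ^ 0)) := by
    simp [pvIt3]
  rw [if_pos (by omega), hmap,
    pvLoopA_run level _ T hT hlt 64 0 0 (by omega) (by omega)]
  simpa using max_eq_right (pvMaxR_nonneg level _ T 0)

lemma pvQual_bounds (seeds : List Int) (level : Int) (hb : ∀ s ∈ seeds, s ≤ 2147483648) :
    ∀ s ∈ seeds.filter (fun s => s ≥ level), level ≤ s ∧ s ≤ 2147483648 := by
  intro s hs
  obtain ⟨h1, h2⟩ := List.mem_filter.mp hs
  exact ⟨by simpa using h2, hb s h1⟩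

lemma pvCase_le0 (n : Int) (seeds : List Int) (level : Int) (hn : 0 < n) (hlev : level ≤ 0)
    (hall : ∀ s ∈ seeds, s ≤ level) :
    max_seeds n seeds level = max_seeds_alt n seeds level := by
  have hq : ∀ s ∈ seeds.filter (fun s => s ≥ level), s = level := by
    intro s hs
    obtain ⟨h1, h2⟩ := List.mem_filter.mp hs
    have := hall s h1
    have : level ≤ s := by simpa using h2
    omega
  have hT : pvFlag level (seeds.filter fun s => s ≥ level) 0 = false := by
    rw [pvFlag_false_iff]
    intro s hs
    rw [show pvIt3 0 s = s from rfl, hq s hs]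
  rw [pvA_eq n seeds level hn 0 (by omega) hT (fun u hu => by omega)]
  rw [show pvMaxR level (seeds.filter fun s => s ≥ level) 0 0
      = pvS level (seeds.filter fun s => s ≥ level) 0 from rfl]
  unfold max_seeds_alt pvS
  rw [if_neg (by omega), if_neg (by omega)]
  by_cases hqe : (seeds.filter fun s => s ≥ level) = []
  · rw [if_pos hqe, hqe]
    simp
  · rw [if_neg hqe, if_neg (by omega), pvCountFold]
    simp [pvIt3]

lemma pvCase_eq1 (n : Int) (seeds : List Int) (hn : 0 < n)
    (hb : ∀ s ∈ seeds, s ≤ 2147483648) :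
    max_seeds n seeds 1 = max_seeds_alt n seeds 1 := by
  have hq := pvQual_bounds seeds 1 hb
  have hflag20 : pvFlag 1 (seeds.filter fun s => s ≥ 1) 20 = false := by
    rw [pvFlag_false_iff]
    intro s hs
    rw [pvReach20 s (by have := hq s hs; omega) (hq s hs).2]
  have hex : ∃ u, pvFlag 1 (seeds.filter fun s => s ≥ 1) u = false := ⟨20, hflag20⟩
  have hT : pvFlag 1 (seeds.filter fun s => s ≥ 1) (Nat.find hex) = false := Nat.find_spec hex
  have hlt : ∀ u, u < Nat.find hex → pvFlag 1 (seeds.filter fun s => s ≥ 1) u = true := by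
    intro u hu
    have := Nat.find_min hex hu
    revert this
    cases pvFlag 1 (seeds.filter fun s => s ≥ 1) u <;> simp
  have hT20 : Nat.find hex ≤ 20 := Nat.find_le hflag20
  rw [pvA_eq n seeds 1 hn (Nat.find hex) (by omega) hT hlt]
  have hTle : ∀ s ∈ seeds.filter (fun s => s ≥ (1:Int)), pvIt3 (Nat.find hex) s ≤ 1 :=
    (pvFlag_false_iff _ _ _).mp hT
  unfold max_seeds_alt
  rw [if_neg (by omega), if_neg (by omega)]
  by_cases hqe : (seeds.filter fun s => s ≥ (1:Int)) = []
  · rw [if_pos hqe]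
    have h1 : pvMaxR 1 (seeds.filter fun s => s ≥ (1:Int)) 0 (Nat.find hex) ≤ 0 := by
      apply pvMaxR_le
      intro u _ _
      rw [pvS, hqe]
      simp
    have h2 := pvMaxR_nonneg 1 (seeds.filter fun s => s ≥ (1:Int)) (Nat.find hex) 0
    omega
  · rw [if_neg hqe, if_pos rfl]
    -- the per-seed step counts: each equals the seed's first time at value ≤ 1
    have hd : ∀ s ∈ seeds.filter (fun s => s ≥ (1:Int)),
        pvIt3 ((pvDecay 1 64 s 0).2) s ≤ 1 ∧
        (∀ u, pvIt3 u s ≤ 1 → (pvDecay 1 64 s 0).2 ≤ u) ∧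
        (∀ u, u < (pvDecay 1 64 s 0).2 → 1 < pvIt3 u s) := by
      intro s hs
      obtain ⟨d, _, hdec, hdle, hdlt, hdmin⟩ :=
        pvDecay_char 1 s le_rfl (hq s hs).1 (hq s hs).2
      rw [hdec]
      exact ⟨hdle, hdmin, hdlt⟩
    -- the folded maximum of the step counts is exactly the stopping time
    have hTT : (seeds.filter fun s => s ≥ (1:Int)).foldl
        (fun T s => max T (pvDecay 1 64 s 0).2) 0 = Nat.find hex := by
      apply le_antisymm
      · apply pvFoldMaxNat_le
        · omega
        · intro s hs
          exact (hd s hs).2.1 (Nat.find hex) (hTle s hs)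
      · rcases Nat.eq_zero_or_pos (Nat.find hex) with h0 | h0
        · omega
        · have hu : Nat.find hex - 1 < Nat.find hex := by omega
          have := hlt _ hu
          rw [pvFlag] at this
          obtain ⟨s, hs, hgt⟩ := List.any_eq_true.mp this
          have hgt' : 1 < pvIt3 (Nat.find hex - 1) s := by
            simpa using hgt
          have hds : Nat.find hex ≤ (pvDecay 1 64 s 0).2 := by
            by_contra hcon
            have hdu : (pvDecay 1 64 s 0).2 ≤ Nat.find hex - 1 := by omega
            have h1le : pvIt3 (Nat.find hex - 1) s ≤ 1 := by
              have heq : Nat.find hex - 1 = (pvDecay 1 64 s 0).2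
                  + (Nat.find hex - 1 - (pvDecay 1 64 s 0).2) := by omega
              rw [heq, pvIt3_add]
              have hge1 : 1 ≤ pvIt3 ((pvDecay 1 64 s 0).2) s :=
                pvIt3_ge_one _ s (by have := hq s hs; omega)
              have hle1 := (hd s hs).1
              have heq1 : pvIt3 ((pvDecay 1 64 s 0).2) s = 1 := by omega
              rw [heq1]
              exact pvIt3_stay_le 1 _ 1 le_rfl le_rfl
            omega
          exact le_trans hds (pvFoldMaxNat_ge (fun s => (pvDecay 1 64 s 0).2) _ 0 s hs)
    rw [hTT]
    -- A's max of the step incomes is attained at the last step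
    apply le_antisymm
    · apply pvMaxR_le
      intro u hu1 hu2
      rw [pvS]
      calc ((List.countP (fun s => pvIt3 u s == 1)
              (seeds.filter fun s => s ≥ (1:Int)) : Nat) : Int) * 2 ^ u
          ≤ ((seeds.filter fun s => s ≥ (1:Int)).length : Int) * 2 ^ u := by
            have := List.countP_le_length
              (p := fun s => pvIt3 u s == (1:Int)) (l := seeds.filter fun s => s ≥ (1:Int))
            have h2 : (0:Int) < 2 ^ u := by positivity
            exact mul_le_mul_of_nonneg_right (by exact_mod_cast this) (by omega)
        _ ≤ ((seeds.filter fun s => s ≥ (1:Int)).length : Int) * 2 ^ (Nat.find hex) := by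
            apply mul_le_mul_of_nonneg_left
            · exact pow_le_pow_right₀ (by omega) (by omega)
            · positivity
    · have hcount : List.countP (fun s => pvIt3 (Nat.find hex) s == 1)
          (seeds.filter fun s => s ≥ (1:Int))
            = (seeds.filter fun s => s ≥ (1:Int)).length := by
        apply List.countP_eq_length.mpr
        intro s hs
        have h1 : 1 ≤ pvIt3 (Nat.find hex) s := pvIt3_ge_one _ s (by have := hq s hs; omega)
        have h2 := hTle s hs
        simp only [beq_iff_eq]
        omega
      have := pvMaxR_ge 1 (seeds.filter fun s => s ≥ (1:Int)) (Nat.find hex) 0 (Nat.find hex)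
        (by omega) (by omega)
      rw [pvS, hcount] at this
      exact this

lemma pvCase_ge2 (n : Int) (seeds : List Int) (level : Int) (hn : 0 < n) (hlev : 2 ≤ level)
    (hb : ∀ s ∈ seeds, s ≤ 2147483648) :
    max_seeds n seeds level = max_seeds_alt n seeds level := by
  have hq := pvQual_bounds seeds level hb
  have hflag20 : pvFlag level (seeds.filter fun s => s ≥ level) 20 = false := by
    rw [pvFlag_false_iff]
    intro s hs
    rw [pvReach20 s (by have := hq s hs; omega) (hq s hs).2]
    omega
  have hex : ∃ u, pvFlag level (seeds.filter fun s => s ≥ level) u = false := ⟨20, hflag20⟩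
  have hT : pvFlag level (seeds.filter fun s => s ≥ level) (Nat.find hex) = false :=
    Nat.find_spec hex
  have hlt : ∀ u, u < Nat.find hex →
      pvFlag level (seeds.filter fun s => s ≥ level) u = true := by
    intro u hu
    have := Nat.find_min hex hu
    revert this
    cases pvFlag level (seeds.filter fun s => s ≥ level) u <;> simp
  have hT20 : Nat.find hex ≤ 20 := Nat.find_le hflag20
  rw [pvA_eq n seeds level hn (Nat.find hex) (by omega) hT hlt]
  have hTle : ∀ s ∈ seeds.filter (fun s => s ≥ level), pvIt3 (Nat.find hex) s ≤ level :=
    (pvFlag_false_iff _ _ _).mp hT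
  unfold max_seeds_alt
  rw [if_neg (by omega), if_pos (by omega)]
  simp only [pvHits_go, List.nil_append]
  -- the collected hit times count exactly the seeds at the level at each step
  have hcnt : ∀ u : Nat,
      (((seeds.filter fun s => s ≥ level).filterMap (pvG level)).count u : Int)
        = ((seeds.filter fun s => s ≥ level).countP (fun s => pvIt3 u s == level) : Int) := by
    intro u
    rw [pvCount_filterMap]
    congr 1
    apply List.countP_congr
    intro s hs
    rw [pvHit_iff level s hlev (hq s hs).1 (hq s hs).2 u]
  -- every hit time is at most the stopping time
  have hmem : ∀ u ∈ (seeds.filter fun s => s ≥ level).filterMap (pvG level),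
      u ≤ Nat.find hex := by
    intro u hu
    have hpos : 0 < ((seeds.filter fun s => s ≥ level).filterMap (pvG level)).count u :=
      List.count_pos_iff.mpr hu
    rw [pvCount_filterMap] at hpos
    obtain ⟨s, hs, hp⟩ := List.countP_pos_iff.mp hpos
    have heq : pvIt3 u s = level := by
      have := pvHit_iff level s hlev (hq s hs).1 (hq s hs).2 u
      rw [this] at hp
      simpa using hp
    by_contra hcon
    have hTu : Nat.find hex < u := by omega
    have := pvNever_again level hlev s (by have := hq s hs; omega) (Nat.find hex) u hTu
      (hTle s hs)
    omega
  set hits := (seeds.filter fun s => s ≥ level).filterMap (pvG level) with hhits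
  set W : Nat → Int := fun t => (2 : Int) ^ t * (hits.count t : Int) with hW
  have hWS : ∀ u : Nat, W u = pvS level (seeds.filter fun s => s ≥ level) u := by
    intro u
    rw [hW, pvS]
    dsimp only
    rw [hcnt u]
    ring
  show pvMaxR level (seeds.filter fun s => s ≥ level) 0 (Nat.find hex)
      = pvBval W (PySem.Set.ofList hits)
  have hWnn : ∀ t ∈ PySem.Set.ofList hits, 0 ≤ W t := by
    intro t _
    rw [hW]
    positivity
  apply le_antisymm
  · apply pvMaxR_le
    intro u hu1 hu2
    by_cases hcu : hits.count u = 0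
    · rw [← hWS u, hW]
      dsimp only
      rw [hcu]
      simp only [Nat.cast_zero, mul_zero]
      exact pvBval_nonneg W _ hWnn
    · have hmem' : u ∈ PySem.Set.ofList hits :=
        (PySem.List.mem_dedup _ _).mpr (List.count_pos_iff.mp (by omega))
      rw [← hWS u]
      exact pvBval_ge W _ u hmem'
  · apply pvBval_le
    · exact pvMaxR_nonneg _ _ _ _
    · intro t ht
      have ht' : t ∈ hits := (PySem.List.mem_dedup _ _).mp ht
      rw [hWS t]
      exact pvMaxR_ge level _ (Nat.find hex) 0 t (by omega) (by simpa using hmem t ht')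

-- ===== VERDICT (by name: the statement is the Claim_ definition above) =====
theorem max_seeds_spec : Claim_equal_max_seeds := by
  intro n seeds level hdom hpre
  unfold Spec_max_seeds
  have hb : ∀ s ∈ seeds, s ≤ 2147483648 := by
    unfold Dom_max_seeds at hdom
    simp only [Bool.and_eq_true, List.all_eq_true] at hdom
    intro s hs
    have h := hdom.1.2 s hs
    simp only [pvDomInt, decide_eq_true_eq] at h
    exact h.2
  by_cases hn : n ≤ 0
  · unfold max_seeds max_seeds_alt
    rw [if_neg (by omega), if_pos hn]
  · by_cases h2 : 2 ≤ level
    · exact pvCase_ge2 n seeds level (by omega) h2 hb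
    · by_cases h1 : level = 1
      · subst h1; exact pvCase_eq1 n seeds (by omega) hb
      · have hlev0 : level ≤ 0 := by omega
        rcases hpre with h | h | h
        · omega
        · omega
        · exact pvCase_le0 n seeds level (by omega) hlev0 h
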